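-- pv_equiv track=rewrite | github.com/fredrik-rose/AdventOfCode2020 | adventofcode/day09/9.py | find_range_that_sum_to_target
-- ===== SOURCE A (Python) =====
-- def find_range_that_sum_to_target(numbers, target):
--     for start in range(len(numbers)):
--         for end, cum_sum in enumerate(cumsum(numbers[start:])):
--             if cum_sum == target:
--                 return numbers[start:start + end + 1]
--             elif cum_sum > target:
--                 break
--     return None
--
-- def cumsum(numbers):
--     acc_sum = 0
--     for e in numbers:
--         acc_sum += e
--         yield acc_sum
-- ===== SOURCE B (Python) =====
-- def find_range_that_sum_to_target(numbers, target):
--     # Back-to-front scan with a monotone stack of prefix-sum records plus a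
--     # binary search: for each start the first index where the running sum
--     # reaches >= target is looked up in O(log n) instead of rescanned.
--     n = len(numbers)
--     prefix = [0]
--     for x in numbers:
--         prefix.append(prefix[-1] + x)
--     best = None
--     # stack of positions, descending; their prefix sums strictly decreasing
--     records = []
--     for start in range(n - 1, -1, -1):
--         while records and prefix[records[-1]] <= prefix[start + 1]:
--             records.pop()
--         records.append(start + 1)
--         # records with prefix >= threshold form a front segment; the last of
--         # them is the smallest position whose prefix reaches the threshold
--         threshold = prefix[start] + target
--         lo, hi = 0, len(records)
--         while lo < hi:
--             mid = (lo + hi) // 2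
--             if prefix[records[mid]] >= threshold:
--                 lo = mid + 1
--             else:
--                 hi = mid
--         if lo > 0 and prefix[records[lo - 1]] == threshold:
--             best = (start, records[lo - 1])
--     if best is None:
--         return None
--     return numbers[best[0]:best[1]]
-- ===== Notes on version B (the rewrite author's own statement) =====
-- stated objective: faster
-- what changed: A restarts a cumulative scan (over a fresh slice) from every start index; B makes one back-to-front pass keeping a monotone stack of prefix-sum record positions and finds each start's first crossing of the target by binary search on that stack.
import Mathlib
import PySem

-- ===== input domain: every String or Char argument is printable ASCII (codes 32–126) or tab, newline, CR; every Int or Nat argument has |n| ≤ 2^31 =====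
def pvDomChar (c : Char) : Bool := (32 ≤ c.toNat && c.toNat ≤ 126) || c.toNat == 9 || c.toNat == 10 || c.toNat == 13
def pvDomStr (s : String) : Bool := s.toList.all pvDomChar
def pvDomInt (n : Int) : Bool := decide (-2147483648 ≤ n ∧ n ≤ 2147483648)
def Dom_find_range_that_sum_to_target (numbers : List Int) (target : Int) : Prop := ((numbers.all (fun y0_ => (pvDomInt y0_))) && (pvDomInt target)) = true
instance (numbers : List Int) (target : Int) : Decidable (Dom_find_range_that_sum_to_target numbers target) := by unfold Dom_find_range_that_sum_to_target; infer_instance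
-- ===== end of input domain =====

-- B replaces A's restarted cumulative scans by one back-to-front pass with a
-- monotone stack of prefix-sum records and a binary search per start.

-- ===== PORT A =====
-- the cumsum generator, materialized eagerly (it is pure and consumed in order)
def pvCumsumFrom (acc : Int) : List Int → List Int
  | [] => []
  | e :: rest => (acc + e) :: pvCumsumFrom (acc + e) rest

-- the inner 'for end, cum_sum in enumerate(...)' loop: some = early return, none = break/exhausted
def pvInnerA (numbers : List Int) (target : Int) (start : Int) : List (Int × Int) → Option (List Int)
  | [] => none
  | (endi, cum) :: rest =>
    if cum = target then some (PySem.List.slice numbers (some start) (some (start + endi + 1)))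
    else if target < cum then none
    else pvInnerA numbers target start rest

-- the outer 'for start in range(len(numbers))' loop
def pvOuterA (numbers : List Int) (target : Int) : List Int → Option (List Int)
  | [] => none
  | start :: rest =>
    match pvInnerA numbers target start
        (PySem.List.enumerate (pvCumsumFrom 0 (PySem.List.slice numbers (some start) none)) 0) with
    | some r => some r
    | none => pvOuterA numbers target rest

def find_range_that_sum_to_target (numbers : List Int) (target : Int) : Option (List Int) :=
  pvOuterA numbers target (PySem.List.pyRange 0 (numbers.length : Int) 1)

-- ===== PORT B =====
-- every list index Source B uses below is in range by construction, so pyGetD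
-- with default 0 computes exactly Python's prefix[...]/records[...] indexing

-- 'prefix = [0]; for x in numbers: prefix.append(prefix[-1] + x)'
def pvBuildPrefix (numbers : List Int) : List Int :=
  numbers.foldl (fun acc x => acc ++ [PySem.List.pyGetD acc (-1) 0 + x]) [0]

-- 'while records and prefix[records[-1]] <= v: records.pop()'
-- (structural fuel recursion: the loop pops at most records.length times)
def pvPopF (pre : List Int) (v : Int) : Nat → List Int → List Int
  | 0, records => records
  | fuel + 1, records =>
    if records ≠ [] ∧ PySem.List.pyGetD pre (PySem.List.pyGetD records (-1) 0) 0 ≤ v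
    then pvPopF pre v fuel records.dropLast
    else records

def pvPop (pre : List Int) (v : Int) (records : List Int) : List Int :=
  pvPopF pre v records.length records

-- 'while lo < hi: mid = (lo + hi) // 2; ...'  (lo, hi stay nonnegative in Source B,
-- so Python's floor division (lo+hi)//2 is Nat division here; structural fuel
-- recursion: hi - lo shrinks every step, so records.length iterations suffice)
def pvBisectF (pre records : List Int) (threshold : Int) : Nat → Nat → Nat → Nat
  | 0, lo, _ => lo
  | fuel + 1, lo, hi =>
    if lo < hi then
      let mid := (lo + hi) / 2
      if threshold ≤ PySem.List.pyGetD pre (PySem.List.pyGetD records (mid : Int) 0) 0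
      then pvBisectF pre records threshold fuel (mid + 1) hi
      else pvBisectF pre records threshold fuel lo mid
    else lo

def pvBisect (pre records : List Int) (threshold : Int) (lo hi : Nat) : Nat :=
  pvBisectF pre records threshold (hi - lo) lo hi

-- one iteration of the 'for start in range(n - 1, -1, -1)' loop body
def pvStepB (pre : List Int) (target : Int) (start : Int)
    (st : Option (Int × Int) × List Int) : Option (Int × Int) × List Int :=
  let records := pvPop pre (PySem.List.pyGetD pre (start + 1) 0) st.2 ++ [start + 1]
  let threshold := PySem.List.pyGetD pre start 0 + target
  let lo := pvBisect pre records threshold 0 records.length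
  let best :=
    if 0 < lo ∧ PySem.List.pyGetD pre (PySem.List.pyGetD records ((lo : Int) - 1) 0) 0 = threshold
    then some (start, PySem.List.pyGetD records ((lo : Int) - 1) 0)
    else st.1
  (best, records)

def pvLoopB (pre : List Int) (target : Int) :
    List Int → Option (Int × Int) × List Int → Option (Int × Int) × List Int
  | [], st => st
  | start :: rest, st => pvLoopB pre target rest (pvStepB pre target start st)

def find_range_that_sum_to_target_alt (numbers : List Int) (target : Int) : Option (List Int) :=
  let pre := pvBuildPrefix numbers
  match (pvLoopB pre target (PySem.List.pyRange ((numbers.length : Int) - 1) (-1) (-1)) (none, [])).1 with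
  | none => none
  | some (s, j) => some (PySem.List.slice numbers (some s) (some j))

-- ===== PRECONDITION & SPEC =====
def Spec_find_range_that_sum_to_target (numbers : List Int) (target : Int) (out : Option (List Int)) : Prop := out = find_range_that_sum_to_target_alt numbers target
instance (numbers : List Int) (target : Int) (out : Option (List Int)) : Decidable (Spec_find_range_that_sum_to_target numbers target out) := by unfold Spec_find_range_that_sum_to_target; infer_instance

-- ===== CLAIM (what is proved, stated in full; the proofs are below) =====
def Claim_equal_find_range_that_sum_to_target : Prop := ∀ (numbers : List Int) (target : Int), Dom_find_range_that_sum_to_target numbers target → Spec_find_range_that_sum_to_target numbers target (find_range_that_sum_to_target numbers target)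

-- ===== LEMMAS AND PROOFS =====

-- prefix sum of the first i elements
def pvP (nums : List Int) (i : Nat) : Int := (nums.take i).sum

-- first index k (and running value c) with a + sum of the first k+1 elements ≥ t
def pvFirstGe (t a : Int) : List Int → Option (Nat × Int)
  | [] => none
  | e :: rest => if t ≤ a + e then some (0, a + e) else (pvFirstGe t (a + e) rest).map (fun p => (p.1 + 1, p.2))

-- start s succeeds: the first crossing of target from s is an exact hit
def pvSucc (nums : List Int) (t : Int) (s : Nat) : Bool :=
  match pvFirstGe t 0 (nums.drop s) with
  | some (_, c) => c == t
  | none => false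

-- the end position (one past) of the hit from start s
def pvJ (nums : List Int) (t : Int) (s : Nat) : Nat :=
  match pvFirstGe t 0 (nums.drop s) with
  | some (k, _) => s + k + 1
  | none => 0

-- common reference value of both programs
def pvRefOut (nums : List Int) (t : Int) : Option (List Int) :=
  ((List.range nums.length).find? (pvSucc nums t)).map
    (fun (s : Nat) => PySem.List.slice nums (some (s : Int)) (some ((pvJ nums t s : Nat) : Int)))

lemma innerA_eq (nums : List Int) (t : Int) :
    ∀ (l : List Int) (a : Int) (s e0 : Int),
    pvInnerA nums t s (PySem.List.enumerate (pvCumsumFrom a l) e0) =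
      match pvFirstGe t a l with
      | some (k, c) => if c = t then some (PySem.List.slice nums (some s) (some (s + e0 + (k : Int) + 1))) else none
      | none => none := by
  intro l
  induction l with
  | nil => intro a s e0; simp [pvCumsumFrom, PySem.List.enumerate_nil, pvInnerA, pvFirstGe]
  | cons e rest ih =>
    intro a s e0
    rw [pvCumsumFrom, PySem.List.enumerate_cons]
    by_cases h1 : a + e = t
    · simp [pvInnerA, h1, pvFirstGe]
      try ring_nf
    · by_cases h2 : t < a + e
      · simp [pvInnerA, h1, h2, pvFirstGe, le_of_lt h2]
      · have h3 : ¬ t ≤ a + e := by omega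
        rw [pvInnerA]
        simp only [h1, h2, if_false]
        rw [ih (a + e) s (e0 + 1)]
        rw [pvFirstGe]
        simp only [h3, if_false]
        cases hfg : pvFirstGe t (a + e) rest with
        | none => simp
        | some p =>
          obtain ⟨k, c⟩ := p
          simp only [Option.map_some]
          have : s + (e0 + 1) + (k : Int) + 1 = s + e0 + ((k + 1 : Nat) : Int) + 1 := by push_cast; ring
          rw [this]

lemma outerA_eq (nums : List Int) (t : Int) :
    ∀ (d s : Nat), s + d = nums.length →
    pvOuterA nums t (PySem.List.pyRange (s : Int) (nums.length : Int) 1) =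
      ((List.range' s d).find? (pvSucc nums t)).map
        (fun (s' : Nat) => PySem.List.slice nums (some (s' : Int)) (some ((pvJ nums t s' : Nat) : Int))) := by
  intro d
  induction d with
  | zero =>
    intro s hs
    rw [PySem.List.pyRange_one_eq_nil (by omega)]
    simp [pvOuterA]
  | succ d ih =>
    intro s hs
    rw [PySem.List.pyRange_one_cons (by omega)]
    rw [pvOuterA]
    rw [PySem.List.slice_from_natCast]
    rw [innerA_eq nums t (nums.drop s) 0 (s : Int) 0]
    have hcast : ((s : Int) + 1) = ((s + 1 : Nat) : Int) := by push_cast; ring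
    rw [List.range', List.find?]
    cases hfg : pvFirstGe t 0 (nums.drop s) with
    | none =>
      have hsucc : pvSucc nums t s = false := by simp [pvSucc, hfg]
      rw [hsucc]
      simp only []
      rw [hcast, ih (s+1) (by omega)]
    | some p =>
      obtain ⟨k, c⟩ := p
      by_cases hc : c = t
      · have hsucc : pvSucc nums t s = true := by simp [pvSucc, hfg, hc]
        have hj : pvJ nums t s = s + k + 1 := by simp [pvJ, hfg]
        rw [hsucc]
        simp only [hc, if_true, Option.map_some]
        rw [hj]
        have : (s : Int) + 0 + (k : Int) + 1 = ((s + k + 1 : Nat) : Int) := by push_cast; ring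
        rw [this]
      · have hsucc : pvSucc nums t s = false := by simp [pvSucc, hfg, hc]
        rw [hsucc]
        simp only [hc, if_false]
        rw [hcast, ih (s+1) (by omega)]

lemma thmA (nums : List Int) (t : Int) :
    find_range_that_sum_to_target nums t = pvRefOut nums t := by
  rw [find_range_that_sum_to_target, pvRefOut]
  have := outerA_eq nums t nums.length 0 (by omega)
  rw [List.range_eq_range']
  exact_mod_cast this


-- ---------- B-side: prefix list ----------

lemma cumsumFrom_getElem? : ∀ (l : List Int) (a : Int) (k : Nat), k < l.length →
    (pvCumsumFrom a l)[k]? = some (a + (l.take (k+1)).sum) := by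
  intro l
  induction l with
  | nil => intro a k hk; simp at hk
  | cons e rest ih =>
    intro a k hk
    cases k with
    | zero => simp [pvCumsumFrom]
    | succ k =>
      rw [pvCumsumFrom]
      simp only [List.getElem?_cons_succ]
      rw [ih (a+e) k (by simpa using hk)]
      simp only [List.take_succ_cons, List.sum_cons, Option.some.injEq]
      ring

lemma buildPrefix_aux (l : List Int) : ∀ (acc : List Int) (h : acc ≠ []),
    List.foldl (fun acc x => acc ++ [PySem.List.pyGetD acc (-1) 0 + x]) acc l
      = acc ++ pvCumsumFrom (acc.getLast h) l := by
  induction l with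
  | nil => intro acc h; simp [pvCumsumFrom]
  | cons e rest ih =>
    intro acc h
    rw [List.foldl_cons]
    rw [ih (acc ++ [PySem.List.pyGetD acc (-1) 0 + e]) (by simp)]
    rw [PySem.List.pyGetD_neg_one acc 0 h]
    rw [List.getLast_concat]
    rw [pvCumsumFrom]
    simp

lemma buildPrefix_eq (nums : List Int) : pvBuildPrefix nums = 0 :: pvCumsumFrom 0 nums := by
  rw [pvBuildPrefix, buildPrefix_aux nums [0] (by simp)]
  simp

lemma prefix_getD (nums : List Int) (i : Nat) (hi : i ≤ nums.length) :
    PySem.List.pyGetD (pvBuildPrefix nums) (i : Int) 0 = pvP nums i := by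
  rw [buildPrefix_eq, PySem.List.pyGetD_natCast]
  cases i with
  | zero => simp [pvP]
  | succ i =>
    rw [List.getD]
    simp only [List.getElem?_cons_succ]
    rw [cumsumFrom_getElem? nums 0 i (by omega)]
    simp [pvP]

-- ---------- B-side: pvFirstGe construction ----------

lemma firstGe_eq_none (t : Int) : ∀ (l : List Int) (a : Int),
    (∀ i, i < l.length → a + (l.take (i+1)).sum < t) → pvFirstGe t a l = none := by
  intro l
  induction l with
  | nil => intro a _; rfl
  | cons e rest ih =>
    intro a h
    have h0 : a + e < t := by simpa using h 0 (by simp)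
    rw [pvFirstGe]
    rw [if_neg (by omega)]
    rw [ih (a+e) (fun i hi => by
      have := h (i+1) (by simpa using hi)
      simpa [List.take_succ_cons, List.sum_cons, add_assoc] using this)]
    rfl

lemma firstGe_eq_some (t : Int) : ∀ (l : List Int) (a : Int) (k : Nat), k < l.length →
    t ≤ a + (l.take (k+1)).sum → (∀ i, i < k → a + (l.take (i+1)).sum < t) →
    pvFirstGe t a l = some (k, a + (l.take (k+1)).sum) := by
  intro l
  induction l with
  | nil => intro a k hk; simp at hk
  | cons e rest ih =>
    intro a k hk hge hlt
    cases k with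
    | zero =>
      rw [pvFirstGe]
      rw [if_pos (by simpa using hge)]
      simp
    | succ k =>
      have h0 : a + e < t := by simpa using hlt 0 (by omega)
      rw [pvFirstGe, if_neg (by omega)]
      rw [ih (a+e) k (by simpa using hk)
        (by simpa [List.take_succ_cons, List.sum_cons, add_assoc] using hge)
        (fun i hi => by
          have := hlt (i+1) (by omega)
          simpa [List.take_succ_cons, List.sum_cons, add_assoc] using this)]
      simp [List.take_succ_cons, add_assoc]

lemma drop_take_sum (nums : List Int) (s k : Nat) :
    ((nums.drop s).take k).sum = pvP nums (s+k) - pvP nums s := by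
  rw [pvP, pvP, List.take_add, List.sum_append]
  ring

-- ---------- B-side: pop loop ----------

lemma popF_spec (pre : List Int) (v : Int) : ∀ (fuel : Nat) (records : List Int),
    records.length ≤ fuel →
    ∃ dropped, records = pvPopF pre v fuel records ++ dropped ∧
      (∀ r ∈ dropped, PySem.List.pyGetD pre r 0 ≤ v) ∧
      (∀ h : pvPopF pre v fuel records ≠ [],
        v < PySem.List.pyGetD pre ((pvPopF pre v fuel records).getLast h) 0) := by
  intro fuel
  induction fuel with
  | zero =>
    intro records hlen
    have : records = [] := by
      cases records with
      | nil => rfl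
      | cons a l => simp at hlen
    subst this
    exact ⟨[], by simp [pvPopF], by simp, by simp [pvPopF]⟩
  | succ fuel ih =>
    intro records hlen
    rw [pvPopF]
    by_cases hc : records ≠ [] ∧ PySem.List.pyGetD pre (PySem.List.pyGetD records (-1) 0) 0 ≤ v
    · rw [if_pos hc]
      obtain ⟨dropped, hd1, hd2, hd3⟩ := ih records.dropLast (by
        have : records.length ≠ 0 := by simpa [List.length_eq_zero_iff] using hc.1
        simp [List.length_dropLast]; omega)
      refine ⟨dropped ++ [records.getLast hc.1], ?_, ?_, hd3⟩
      · conv_lhs => rw [← List.dropLast_append_getLast hc.1, hd1]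
        simp
      · intro r hr
        rcases List.mem_append.mp hr with h | h
        · exact hd2 r h
        · have : r = records.getLast hc.1 := by simpa using h
          subst this
          have := hc.2
          rwa [PySem.List.pyGetD_neg_one records 0 hc.1] at this
    · rw [if_neg hc]
      refine ⟨[], by simp, by simp, ?_⟩
      intro h
      rw [not_and_or] at hc
      rcases hc with hc | hc
      · exact absurd h (by simpa using hc)
      · rw [PySem.List.pyGetD_neg_one records 0 h] at hc
        omega


-- ---------- B-side: stack invariant ----------

-- records after boundary m: positions in (m, n], strictly decreasing, prefix
-- sums strictly decreasing, and dominating every position of (m, n]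
def pvInv (nums : List Int) (m : Nat) (rs : List Nat) : Prop :=
  (∀ r ∈ rs, m < r ∧ r ≤ nums.length) ∧
  rs.Pairwise (fun a b => b < a) ∧
  rs.Pairwise (fun a b => pvP nums b < pvP nums a) ∧
  (∀ j, m < j → j ≤ nums.length → ∃ r ∈ rs, r ≤ j ∧ pvP nums j ≤ pvP nums r)

lemma getLast_min (f : Nat → Int) : ∀ (l : List Nat) (h : l ≠ []),
    l.Pairwise (fun a b => f b < f a) → ∀ a ∈ l, f (l.getLast h) ≤ f a := by
  intro l
  induction l with
  | nil => intro h; exact absurd rfl h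
  | cons x xs ih =>
    intro h hp a ha
    cases xs with
    | nil =>
      have : a = x := by simpa using ha
      subst this; simp
    | cons y ys =>
      rw [List.getLast_cons (by simp)]
      rcases List.mem_cons.mp ha with rfl | ha'
      · have hlast : (y :: ys).getLast (by simp) ∈ y :: ys := List.getLast_mem _
        have := (List.pairwise_cons.mp hp).1 _ hlast
        omega
      · exact ih (by simp) (List.pairwise_cons.mp hp).2 a ha'

lemma bisectF_succ (pre records : List Int) (thr : Int) (fuel lo hi : Nat) :
    pvBisectF pre records thr (fuel+1) lo hi =
      if lo < hi then
        (if thr ≤ PySem.List.pyGetD pre (PySem.List.pyGetD records (((lo + hi) / 2 : Nat) : Int) 0) 0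
         then pvBisectF pre records thr fuel ((lo + hi) / 2 + 1) hi
         else pvBisectF pre records thr fuel lo ((lo + hi) / 2))
      else lo := rfl

lemma bisectF_spec (pre records : List Int) (thr : Int)
    (hanti : ∀ i j : Nat, i ≤ j → j < records.length →
      PySem.List.pyGetD pre (PySem.List.pyGetD records (j : Int) 0) 0 ≤
      PySem.List.pyGetD pre (PySem.List.pyGetD records (i : Int) 0) 0) :
    ∀ (fuel lo hi : Nat), lo ≤ hi → hi ≤ records.length → hi - lo ≤ fuel →
    (∀ i, i < lo → thr ≤ PySem.List.pyGetD pre (PySem.List.pyGetD records (i : Int) 0) 0) →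
    (∀ i, hi ≤ i → i < records.length → PySem.List.pyGetD pre (PySem.List.pyGetD records (i : Int) 0) 0 < thr) →
    pvBisectF pre records thr fuel lo hi ≤ records.length ∧
    (∀ i, i < pvBisectF pre records thr fuel lo hi → thr ≤ PySem.List.pyGetD pre (PySem.List.pyGetD records (i : Int) 0) 0) ∧
    (∀ i, pvBisectF pre records thr fuel lo hi ≤ i → i < records.length →
      PySem.List.pyGetD pre (PySem.List.pyGetD records (i : Int) 0) 0 < thr) := by
  intro fuel
  induction fuel with
  | zero =>
    intro lo hi h1 h2 h3 hlo hhi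
    have : lo = hi := by omega
    subst this
    rw [pvBisectF]
    exact ⟨h2, hlo, hhi⟩
  | succ fuel ih =>
    intro lo hi h1 h2 h3 hlo hhi
    rw [bisectF_succ]
    by_cases hlh : lo < hi
    · rw [if_pos hlh]
      by_cases hv : thr ≤ PySem.List.pyGetD pre (PySem.List.pyGetD records (((lo + hi) / 2 : Nat) : Int) 0) 0
      · rw [if_pos hv]
        refine ih ((lo + hi) / 2 + 1) hi (by omega) h2 (by omega) ?_ hhi
        intro i hi'
        have hmid : (lo + hi) / 2 < records.length := by omega
        exact le_trans hv (hanti i ((lo + hi) / 2) (by omega) hmid)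
      · rw [if_neg hv]
        refine ih lo ((lo + hi) / 2) (by omega) (by omega) (by omega) hlo ?_
        intro i hi1 hi2
        exact lt_of_le_of_lt (hanti ((lo + hi) / 2) i hi1 hi2) (by omega)
    · rw [if_neg hlh]
      have : lo = hi := by omega
      subst this
      exact ⟨h2, hlo, hhi⟩


lemma pop_step (nums : List Int) (m : Nat) (hm : m < nums.length) (rs : List Nat)
    (hInv : pvInv nums (m+1) rs) :
    ∃ rs1 : List Nat,
      pvPop (pvBuildPrefix nums) (PySem.List.pyGetD (pvBuildPrefix nums) ((m : Int) + 1) 0)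
          (rs.map (Nat.cast)) ++ [(m : Int) + 1] = rs1.map (Nat.cast) ∧
      pvInv nums m rs1 := by
  obtain ⟨hbd, hpos, hP, hcomp⟩ := hInv
  have hcast1 : ((m : Int) + 1) = ((m + 1 : Nat) : Int) := by push_cast; ring
  have hv : PySem.List.pyGetD (pvBuildPrefix nums) ((m : Int) + 1) 0 = pvP nums (m+1) := by
    rw [hcast1, prefix_getD nums (m+1) (by omega)]
  obtain ⟨dropped, hd1, hd2, hd3⟩ :=
    popF_spec (pvBuildPrefix nums) (PySem.List.pyGetD (pvBuildPrefix nums) ((m : Int) + 1) 0)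
      (rs.map (Nat.cast)).length (rs.map (Nat.cast)) le_rfl
  obtain ⟨rs', ds, hsplit, hres, hds⟩ := List.append_eq_map_iff.mp hd1.symm
  refine ⟨rs' ++ [m+1], ?_, ?_, ?_, ?_, ?_⟩
  · rw [pvPop, ← hres]
    rw [show ((rs' ++ [m+1]).map (Nat.cast : Nat → Int)) = rs'.map (Nat.cast) ++ [((m+1 : Nat) : Int)] by simp]
    rw [hcast1]
  · -- bounds
    intro r hr
    rcases List.mem_append.mp hr with h | h
    · have : r ∈ rs := by rw [hsplit]; exact List.mem_append_left _ h
      have := hbd r this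
      omega
    · have : r = m + 1 := by simpa using h
      omega
  · -- positions strictly decreasing
    rw [List.pairwise_append]
    refine ⟨?_, by simp, ?_⟩
    · have : rs.Pairwise (fun a b => b < a) := hpos
      rw [hsplit, List.pairwise_append] at this
      exact this.1
    · intro a ha b hb
      have hb' : b = m + 1 := by simpa using hb
      have : a ∈ rs := by rw [hsplit]; exact List.mem_append_left _ ha
      have := hbd a this
      omega
  · -- prefix sums strictly decreasing
    have hlastlt : ∀ a ∈ rs', pvP nums (m+1) < pvP nums a := by
      intro a ha
      have hres_ne : pvPopF (pvBuildPrefix nums) (PySem.List.pyGetD (pvBuildPrefix nums) ((m : Int) + 1) 0)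
          (rs.map (Nat.cast : Nat → Int)).length (rs.map (Nat.cast : Nat → Int)) ≠ [] := by
        rw [← hres]
        simp only [ne_eq, List.map_eq_nil_iff]
        intro h; subst h; simp at ha
      have h3 := hd3 hres_ne
      have hrs'ne : rs' ≠ [] := by intro h; subst h; simp at ha
      have hgl : (pvPopF (pvBuildPrefix nums) (PySem.List.pyGetD (pvBuildPrefix nums) ((m : Int) + 1) 0)
          (rs.map (Nat.cast : Nat → Int)).length (rs.map (Nat.cast : Nat → Int))).getLast hres_ne
            = ((rs'.getLast hrs'ne : Nat) : Int) := by
        have := List.getLast_map (f := (Nat.cast : Nat → Int)) (l := rs') (by simpa using hrs'ne)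
        simp only [← hres] at *
        exact this
      rw [hgl, hv] at h3
      have hlast_mem : rs'.getLast hrs'ne ∈ rs' := List.getLast_mem _
      have hlast_rs : rs'.getLast hrs'ne ∈ rs := by rw [hsplit]; exact List.mem_append_left _ hlast_mem
      have hle : rs'.getLast hrs'ne ≤ nums.length := (hbd _ hlast_rs).2
      rw [prefix_getD nums _ hle] at h3
      have hpair' : rs'.Pairwise (fun a b => pvP nums b < pvP nums a) := by
        have := hP
        rw [hsplit, List.pairwise_append] at this
        exact this.1
      have := getLast_min (pvP nums) rs' hrs'ne hpair' a ha
      omega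
    rw [List.pairwise_append]
    refine ⟨?_, by simp, ?_⟩
    · have := hP
      rw [hsplit, List.pairwise_append] at this
      exact this.1
    · intro a ha b hb
      have hb' : b = m + 1 := by simpa using hb
      subst hb'
      exact hlastlt a ha
  · -- completeness
    intro j hj1 hj2
    by_cases hj : j = m + 1
    · exact ⟨m+1, by simp, by omega, by rw [hj]⟩
    · obtain ⟨r, hrmem, hrle, hrP⟩ := hcomp j (by omega) hj2
      rw [hsplit] at hrmem
      rcases List.mem_append.mp hrmem with h | h
      · exact ⟨r, List.mem_append_left _ h, hrle, hrP⟩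
      · have hrd : ((r : Nat) : Int) ∈ dropped := by rw [← hds]; exact List.mem_map_of_mem h
        have := hd2 _ hrd
        have hrn : r ≤ nums.length := by
          have : r ∈ rs := by rw [hsplit]; exact List.mem_append_right _ h
          exact (hbd r this).2
        rw [prefix_getD nums r hrn, hv] at this
        exact ⟨m+1, by simp, by omega, by omega⟩

lemma stepB_spec (nums : List Int) (t : Int) (m : Nat) (hm : m < nums.length)
    (rs : List Nat) (hInv : pvInv nums (m+1) rs) (best0 : Option (Int × Int)) :
    ∃ rs1 : List Nat,
      (pvStepB (pvBuildPrefix nums) t (m : Int) (best0, rs.map (Nat.cast))).2 = rs1.map (Nat.cast) ∧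
      pvInv nums m rs1 ∧
      (pvStepB (pvBuildPrefix nums) t (m : Int) (best0, rs.map (Nat.cast))).1 =
        (if pvSucc nums t m then some ((m : Int), ((pvJ nums t m : Nat) : Int)) else best0) := by
  obtain ⟨rs1, hmap, hInv1⟩ := pop_step nums m hm rs hInv
  refine ⟨rs1, by simp only [pvStepB]; exact hmap, hInv1, ?_⟩
  simp only [pvStepB]
  rw [hmap]
  rw [prefix_getD nums m (by omega)]
  have hval2 : ∀ i, (hi : i < rs1.length) →
      PySem.List.pyGetD (rs1.map (Nat.cast)) ((i : Nat) : Int) 0 = ((rs1[i] : Nat) : Int) := by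
    intro i hi
    rw [PySem.List.pyGetD_natCast]
    rw [List.getD_eq_getElem?_getD, List.getElem?_map, List.getElem?_eq_getElem hi]
    rfl
  have hval : ∀ i, (hi : i < rs1.length) →
      PySem.List.pyGetD (pvBuildPrefix nums) (PySem.List.pyGetD (rs1.map (Nat.cast)) ((i : Nat) : Int) 0) 0
        = pvP nums rs1[i] := by
    intro i hi
    rw [hval2 i hi, prefix_getD nums _ ((hInv1.1 _ (List.getElem_mem hi)).2)]
  have hanti : ∀ i j : Nat, i ≤ j → j < (rs1.map (Nat.cast : Nat → Int)).length →
      PySem.List.pyGetD (pvBuildPrefix nums) (PySem.List.pyGetD (rs1.map (Nat.cast)) ((j : Nat) : Int) 0) 0 ≤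
      PySem.List.pyGetD (pvBuildPrefix nums) (PySem.List.pyGetD (rs1.map (Nat.cast)) ((i : Nat) : Int) 0) 0 := by
    intro i j hij hj
    rw [List.length_map] at hj
    rw [hval i (by omega), hval j hj]
    rcases Nat.eq_or_lt_of_le hij with rfl | hlt
    · exact le_rfl
    · have := (List.pairwise_iff_getElem.mp hInv1.2.2.1) i j (by omega) hj hlt
      omega
  obtain ⟨hb, hbl, hbr⟩ := bisectF_spec (pvBuildPrefix nums) (rs1.map (Nat.cast))
    (pvP nums m + t) hanti ((rs1.map (Nat.cast : Nat → Int)).length - 0) 0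
    (rs1.map (Nat.cast : Nat → Int)).length (by omega) le_rfl (by omega)
    (by omega) (by intro i h1 h2; omega)
  have hbeq : pvBisect (pvBuildPrefix nums) (List.map Nat.cast rs1) (pvP nums m + t) 0
      (List.map (Nat.cast : Nat → Int) rs1).length
      = pvBisectF (pvBuildPrefix nums) (List.map Nat.cast rs1) (pvP nums m + t)
        ((List.map (Nat.cast : Nat → Int) rs1).length - 0) 0
        (List.map (Nat.cast : Nat → Int) rs1).length := rfl
  rw [hbeq]
  set b := pvBisectF (pvBuildPrefix nums) (List.map Nat.cast rs1) (pvP nums m + t)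
      ((List.map (Nat.cast : Nat → Int) rs1).length - 0) 0
      (List.map (Nat.cast : Nat → Int) rs1).length with hbdef
  rw [List.length_map] at hb
  by_cases hb0 : b = 0
  · -- no position reaches the threshold: no crossing at all from start m
    have hnone : pvFirstGe t 0 (nums.drop m) = none := by
      apply firstGe_eq_none
      intro i hi
      rw [List.length_drop] at hi
      rw [drop_take_sum, show m + (i+1) = m+i+1 from by omega]
      obtain ⟨r, hrmem, hrle, hrP⟩ := hInv1.2.2.2 (m+i+1) (by omega) (by omega)
      obtain ⟨i', hi', hri⟩ := List.mem_iff_getElem.mp hrmem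
      have hv' := hbr i' (by omega) (by rw [List.length_map]; omega)
      rw [hval i' hi', hri] at hv'
      omega
    have hsuccf : pvSucc nums t m = false := by simp [pvSucc, hnone]
    rw [hsuccf, if_neg (by rintro ⟨h1, _⟩; omega)]
    simp
  · -- the record at index b-1 is exactly the first crossing position
    have hbpos : 0 < b := by omega
    have hb1 : b - 1 < rs1.length := by omega
    have hjmem := hInv1.1 _ (List.getElem_mem hb1)
    have hjge : pvP nums m + t ≤ pvP nums rs1[b-1] := by
      have := hbl (b-1) (by omega)
      rwa [hval (b-1) hb1] at this
    have hfirst : ∀ j, m < j → j < rs1[b-1] → pvP nums j < pvP nums m + t := by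
      intro j h1 h2
      have hjn : j ≤ nums.length := by omega
      obtain ⟨r, hrmem, hrle, hrP⟩ := hInv1.2.2.2 j h1 hjn
      obtain ⟨i', hi', hri⟩ := List.mem_iff_getElem.mp hrmem
      have hgei : b ≤ i' := by
        by_contra hlt'
        have hile : i' ≤ b - 1 := by omega
        rcases Nat.eq_or_lt_of_le hile with heq' | hlt''
        · subst heq'; omega
        · have := (List.pairwise_iff_getElem.mp hInv1.2.1) i' (b-1) hi' hb1 hlt''
          omega
      have hv' := hbr i' hgei (by rw [List.length_map]; omega)
      rw [hval i' hi', hri] at hv'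
      omega
    have hsome := firstGe_eq_some t (nums.drop m) 0 (rs1[b-1] - m - 1)
      (by rw [List.length_drop]; omega)
      (by rw [drop_take_sum]
          have harith : m + (rs1[b-1] - m - 1 + 1) = rs1[b-1] := by omega
          rw [harith]; omega)
      (by intro i hi
          rw [drop_take_sum, show m + (i+1) = m+i+1 from by omega]
          have h' := hfirst (m+i+1) (by omega) (by omega)
          omega)
    have hcval : (0 : Int) + ((nums.drop m).take (rs1[b-1] - m - 1 + 1)).sum
        = pvP nums rs1[b-1] - pvP nums m := by
      rw [drop_take_sum]
      have harith : m + (rs1[b-1] - m - 1 + 1) = rs1[b-1] := by omega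
      rw [harith]; ring
    rw [hcval] at hsome
    have hjeq : pvJ nums t m = rs1[b-1] := by
      unfold pvJ
      rw [hsome]
      change m + (rs1[b-1] - m - 1) + 1 = rs1[b-1]
      omega
    have hc1 : ((b : Int) - 1) = ((b - 1 : Nat) : Int) := by omega
    rw [hc1]
    by_cases heq : pvP nums rs1[b-1] = pvP nums m + t
    · rw [if_pos ⟨hbpos, by rw [hval (b-1) hb1]; omega⟩]
      have hsucct : pvSucc nums t m = true := by
        unfold pvSucc
        rw [hsome]
        change (pvP nums rs1[b-1] - pvP nums m == t) = true
        rw [beq_iff_eq]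
        omega
      rw [hsucct, if_pos rfl, hval2 (b-1) hb1, hjeq]
    · rw [if_neg (by rintro ⟨_, h2⟩; rw [hval (b-1) hb1] at h2; omega)]
      have hsuccf : pvSucc nums t m = false := by
        unfold pvSucc
        rw [hsome]
        change (pvP nums rs1[b-1] - pvP nums m == t) = false
        rw [beq_eq_false_iff_ne]
        omega
      rw [hsuccf]
      simp

-- ---------- assembly ----------


lemma loopB_eq (nums : List Int) (t : Int) : ∀ (m : Nat), m ≤ nums.length →
    ∀ (best0 : Option (Int × Int)) (rs : List Nat), pvInv nums m rs →
    (pvLoopB (pvBuildPrefix nums) t (PySem.List.pyRange ((m : Int) - 1) (-1) (-1)) (best0, rs.map (Nat.cast))).1 =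
      (match (List.range m).find? (pvSucc nums t) with
       | some s => some ((s : Int), ((pvJ nums t s : Nat) : Int))
       | none => best0) := by
  intro m
  induction m with
  | zero =>
    intro _ best0 rs _
    rw [PySem.List.pyRange_neg_one_eq_nil (by omega)]
    simp [pvLoopB]
  | succ m ih =>
    intro hm best0 rs hInv
    have hcons : PySem.List.pyRange (((m+1 : Nat) : Int) - 1) (-1) (-1)
        = ((m : Nat) : Int) :: PySem.List.pyRange (((m : Nat) : Int) - 1) (-1) (-1) := by
      have h1 : (((m+1 : Nat) : Int) - 1) = ((m : Nat) : Int) := by push_cast; ring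
      rw [h1, PySem.List.pyRange_neg_one_cons (by omega)]
    rw [hcons, pvLoopB]
    obtain ⟨rs1, hmap, hInv1, hbest⟩ := stepB_spec nums t m (by omega) rs hInv best0
    have hpair : pvStepB (pvBuildPrefix nums) t ((m : Nat) : Int) (best0, rs.map (Nat.cast))
        = ((if pvSucc nums t m then some ((m : Int), ((pvJ nums t m : Nat) : Int)) else best0),
           rs1.map (Nat.cast)) := by
      exact Prod.ext hbest hmap
    rw [hpair, ih (by omega) _ rs1 hInv1]
    rw [List.range_succ, List.find?_append]
    cases hfind : (List.range m).find? (pvSucc nums t) with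
    | some s => simp
    | none =>
      simp only [Option.none_or]
      cases hsucc : pvSucc nums t m <;> simp [List.find?, hsucc]

lemma thmB (nums : List Int) (t : Int) :
    find_range_that_sum_to_target_alt nums t = pvRefOut nums t := by
  rw [find_range_that_sum_to_target_alt]
  have hInv0 : pvInv nums nums.length [] :=
    ⟨by simp, by simp, by simp, by intro j h1 h2; omega⟩
  have hloop := loopB_eq nums t nums.length le_rfl none [] hInv0
  simp only [List.map_nil] at hloop
  rw [hloop, pvRefOut]
  cases hfind : (List.range nums.length).find? (pvSucc nums t) with
  | none => simp
  | some s => simp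

-- ===== VERDICT (by name: the statement is the Claim_ definition above) =====
theorem find_range_that_sum_to_target_spec : Claim_equal_find_range_that_sum_to_target := by
  intro numbers target _
  unfold Spec_find_range_that_sum_to_target
  rw [thmA, thmB]
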